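-- pv_equiv track=rewrite | github.com/RauPro/Competitive-Programming | Codeforces/Codeforces Round 987 (Div 2)/C.py | solve
-- ===== SOURCE A (Python) =====
-- def solve(n):
--     if n & 1 == 1:
--         if n < 27:
--             return [-1]
--         ans = [0] * (n + 1)
--         ans[1], ans[10], ans[26], ans[23], ans[27] = 1, 1, 1, 12, 12
--         count, cnt = 2, 0
--         for i in range(2, n + 1):
--             if ans[i] == 0:
--                 if count == 12:
--                     count += 1
--                 ans[i] = count
--                 cnt = (cnt + 1) % 2
--                 if cnt == 0:
--                     count += 1
--         return ans[1:n + 1]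
--     else:
--         return [i // 2 + 1 for i in range(n)]
-- ===== SOURCE B (Python) =====
-- def solve(n):
--     if n & 1 == 1:
--         if n < 27:
--             return [-1]
--         prefix = [1, 2, 2, 3, 3, 4, 4, 5, 5, 1, 6, 6, 7, 7,
--                   8, 8, 9, 9, 10, 10, 11, 11, 12, 13, 13, 1, 12]
--         return prefix + [v for v in range(14, 14 + (n - 27) // 2) for _ in (0, 1)]
--     else:
--         return [v for v in range(1, n // 2 + 1) for _ in (0, 1)]
-- ===== Notes on version B (the rewrite author's own statement) =====
-- stated objective: alternative
-- what changed: The odd branch's stateful per-position scan (mutable array, presets, count/cnt toggle) is replaced by pure concatenation: a 27-element literal prefix covering positions 1..27 followed by a duplicated arithmetic range for the tail, and the even branch builds duplicated pairs from range(1, n//2+1) instead of mapping i//2+1 over range(n).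
import Mathlib
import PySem

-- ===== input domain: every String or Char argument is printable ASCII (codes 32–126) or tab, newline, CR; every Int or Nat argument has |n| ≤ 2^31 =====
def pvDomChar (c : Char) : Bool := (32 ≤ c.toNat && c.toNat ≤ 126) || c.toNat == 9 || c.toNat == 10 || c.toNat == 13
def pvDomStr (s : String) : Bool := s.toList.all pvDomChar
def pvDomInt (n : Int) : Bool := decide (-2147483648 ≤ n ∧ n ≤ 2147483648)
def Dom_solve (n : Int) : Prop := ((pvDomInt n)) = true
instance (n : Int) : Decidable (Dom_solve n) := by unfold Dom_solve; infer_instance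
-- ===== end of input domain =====

-- B replaces A's stateful per-position scan by pure concatenation: a literal 27-element
-- prefix plus a duplicated arithmetic range for the tail (alternative decomposition, same cost).

-- ===== PORT A =====
-- loop body of A's for-loop; ans[i] read/write are always in range here (2 ≤ i ≤ n < len(ans)),
-- so pyGetD/pySetD are exact for Python's ans[i] / ans[i] = v on the reached states
def solveLoopA (st : List Int × Int × Int) (i : Int) : List Int × Int × Int :=
  match st with
  | (ans, count, cnt) =>
    if PySem.List.pyGetD ans i 0 == 0 then
      let count := if count == 12 then count + 1 else count
      let ans := PySem.List.pySetD ans i count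
      let cnt := PySem.Int.mod (cnt + 1) 2
      let count := if cnt == 0 then count + 1 else count
      (ans, count, cnt)
    else st

def solve (n : Int) : List Int :=
  if PySem.Int.band n 1 == 1 then
    if n < 27 then [-1]
    else
      let ans := PySem.List.pyRepeat [(0 : Int)] (n + 1)
      let ans := PySem.List.pySetD ans 1 1
      let ans := PySem.List.pySetD ans 10 1
      let ans := PySem.List.pySetD ans 26 1
      let ans := PySem.List.pySetD ans 23 12
      let ans := PySem.List.pySetD ans 27 12
      let st := (PySem.List.pyRange 2 (n + 1) 1).foldl solveLoopA (ans, 2, 0)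
      PySem.List.slice st.1 (some 1) (some (n + 1))
  else
    (PySem.List.pyRange 0 n 1).map (fun i => PySem.Int.floordiv i 2 + 1)

-- ===== PORT B =====
def solvePrefix : List Int :=
  [1, 2, 2, 3, 3, 4, 4, 5, 5, 1, 6, 6, 7, 7, 8, 8, 9, 9, 10, 10, 11, 11, 12, 13, 13, 1, 12]

-- [v for v in range(a, b) for _ in (0, 1)]
def dupRange (a b : Int) : List Int :=
  (PySem.List.pyRange a b 1).flatMap (fun v => [v, v])

def solve_alt (n : Int) : List Int :=
  if PySem.Int.band n 1 == 1 then
    if n < 27 then [-1]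
    else solvePrefix ++ dupRange 14 (14 + PySem.Int.floordiv (n - 27) 2)
  else
    dupRange 1 (PySem.Int.floordiv n 2 + 1)

-- ===== PRECONDITION & SPEC =====
def Spec_solve (n : Int) (out : List Int) : Prop := out = solve_alt n
instance (n : Int) (out : List Int) : Decidable (Spec_solve n out) := by unfold Spec_solve; infer_instance

-- ===== CLAIM (what is proved, stated in full; the proofs are below) =====
def Claim_equal_solve : Prop := ∀ (n : Int), Dom_solve n → Spec_solve n (solve n)

-- ===== LEMMAS AND PROOFS =====

-- the "initial" content of position i in A's array (the presets, elsewhere 0)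
def presetG (i : Int) : Int :=
  if i = 1 ∨ i = 10 ∨ i = 26 then 1 else if i = 23 ∨ i = 27 then 12 else 0

-- number of non-preset positions in [1, m)
def kfun (m : Int) : Int :=
  m - 1 - ((if 1 < m then 1 else 0) + (if 10 < m then 1 else 0) + (if 23 < m then 1 else 0)
    + (if 26 < m then 1 else 0) + (if 27 < m then 1 else 0))

-- A's `count` as a function of the number k of fills already done
def cfun (k : Int) : Int := if k ≤ 20 then 2 + k / 2 else 3 + k / 2

-- the value the k-th fill receives
def fval (k : Int) : Int := if 2 + k / 2 < 12 then 2 + k / 2 else 3 + k / 2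

-- the final content of position i (for i ∈ [1, n])
def ffin (i : Int) : Int :=
  if i = 1 ∨ i = 10 ∨ i = 26 then 1 else if i = 23 ∨ i = 27 then 12 else fval (kfun i)

lemma kfun_nonneg {m : Int} (hm : 1 ≤ m) : 0 ≤ kfun m := by
  unfold kfun; split_ifs <;> omega

lemma kfun_succ_preset {m : Int} (h : m = 1 ∨ m = 10 ∨ m = 26 ∨ m = 23 ∨ m = 27) :
    kfun (m + 1) = kfun m := by
  unfold kfun; split_ifs <;> omega

lemma kfun_succ_fill {m : Int} (h1 : m ≠ 1) (h2 : m ≠ 10) (h3 : m ≠ 26) (h4 : m ≠ 23)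
    (h5 : m ≠ 27) : kfun (m + 1) = kfun m + 1 := by
  unfold kfun; split_ifs <;> omega

lemma ffin_eq_fval {m : Int} (h1 : m ≠ 1) (h2 : m ≠ 10) (h3 : m ≠ 26) (h4 : m ≠ 23)
    (h5 : m ≠ 27) : ffin m = fval (kfun m) := by
  unfold ffin; rw [if_neg (by tauto), if_neg (by tauto)]

lemma fill_val {k : Int} (hk : 0 ≤ k) :
    (if cfun k == 12 then cfun k + 1 else cfun k) = fval k := by
  unfold cfun fval; simp only [beq_iff_eq]; split_ifs <;> omega

lemma fill_cnt (k : Int) : PySem.Int.mod (k % 2 + 1) 2 = (k + 1) % 2 := by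
  rw [PySem.Int.mod_eq_emod_of_pos (by norm_num)]; omega

lemma fill_count {k : Int} (hk : 0 ≤ k) :
    (if (k + 1) % 2 == 0 then (if cfun k == 12 then cfun k + 1 else cfun k) + 1
     else (if cfun k == 12 then cfun k + 1 else cfun k)) = cfun (k + 1) := by
  unfold cfun; simp only [beq_iff_eq]; split_ifs <;> omega

lemma presetG_preset {m : Int} (h : m = 1 ∨ m = 10 ∨ m = 26 ∨ m = 23 ∨ m = 27) :
    presetG m = ffin m ∧ presetG m ≠ 0 := by
  unfold presetG ffin; split_ifs <;> simp_all

lemma presetG_fill {m : Int} (h1 : m ≠ 1) (h2 : m ≠ 10) (h3 : m ≠ 26) (h4 : m ≠ 23)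
    (h5 : m ≠ 27) : presetG m = 0 := by
  unfold presetG; rw [if_neg (by tauto), if_neg (by tauto)]

-- reading / writing A's array at the current position m
lemma read_at {m : Int} (hm : 2 ≤ m) (x : Int) (P S : List Int)
    (hP : P.length = (m - 1).toNat) :
    PySem.List.pyGetD ((0 : Int) :: (P ++ x :: S)) m 0 = x := by
  rw [PySem.List.pyGetD_of_nonneg _ _ (by omega)]
  have hl : ((0 : Int) :: P).length = m.toNat := by simp [hP]; omega
  rw [List.getD_eq_getElem?_getD,
    show ((0 : Int) :: (P ++ x :: S)) = ((0 : Int) :: P) ++ x :: S from rfl,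
    List.getElem?_append_right (le_of_eq hl), hl, Nat.sub_self]
  rfl

lemma set_at {m : Int} (hm : 2 ≤ m) (v x : Int) (P S : List Int)
    (hP : P.length = (m - 1).toNat) :
    PySem.List.pySetD ((0 : Int) :: (P ++ x :: S)) m v = (0 : Int) :: (P ++ v :: S) := by
  rw [PySem.List.pySetD_of_nonneg _ _ (by omega)]
  have hl : ((0 : Int) :: P).length = m.toNat := by simp [hP]; omega
  rw [show ((0 : Int) :: (P ++ x :: S)) = ((0 : Int) :: P) ++ x :: S from rfl,
    List.set_append, if_neg (by omega), hl, Nat.sub_self, List.set_cons_zero]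
  rfl

-- A's loop body, applied at position m with the invariant state
lemma stepA_eq {n m : Int} (hm : 2 ≤ m) :
    solveLoopA
      ((0 : Int) :: ((PySem.List.pyRange 1 m 1).map ffin
          ++ presetG m :: (PySem.List.pyRange (m + 1) (n + 1) 1).map presetG),
       cfun (kfun m), kfun m % 2) m
    = ((0 : Int) :: ((PySem.List.pyRange 1 (m + 1) 1).map ffin
          ++ (PySem.List.pyRange (m + 1) (n + 1) 1).map presetG),
       cfun (kfun (m + 1)), kfun (m + 1) % 2) := by
  have hP : ((PySem.List.pyRange 1 m 1).map ffin).length = (m - 1).toNat := by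
    simp [PySem.List.length_pyRange_one]
  have hmap : (PySem.List.pyRange 1 m 1).map ffin ++ [ffin m]
      = (PySem.List.pyRange 1 (m + 1) 1).map ffin := by
    rw [PySem.List.pyRange_one_succ_right (by omega : (1 : Int) ≤ m), List.map_append]
    rfl
  by_cases hpre : m = 1 ∨ m = 10 ∨ m = 26 ∨ m = 23 ∨ m = 27
  · obtain ⟨hfg, hne⟩ := presetG_preset hpre
    simp only [solveLoopA, read_at hm (presetG m) _ _ hP]
    rw [if_neg (by simp [hne]), kfun_succ_preset hpre]
    rw [show (PySem.List.pyRange 1 m 1).map ffin ++ presetG m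
          :: (PySem.List.pyRange (m + 1) (n + 1) 1).map presetG
        = ((PySem.List.pyRange 1 m 1).map ffin ++ [presetG m])
          ++ (PySem.List.pyRange (m + 1) (n + 1) 1).map presetG by simp]
    rw [hfg, hmap]
  · rw [not_or, not_or, not_or, not_or] at hpre
    obtain ⟨h1, h2, h3, h4, h5⟩ := hpre
    have hg0 := presetG_fill h1 h2 h3 h4 h5
    have hk0 : 0 ≤ kfun m := kfun_nonneg (by omega)
    simp only [solveLoopA, hg0]
    rw [read_at hm 0 _ _ hP, if_pos (by simp)]
    rw [fill_val hk0, ← ffin_eq_fval h1 h2 h3 h4 h5,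
      set_at hm (ffin m) 0 _ _ hP, fill_cnt (kfun m)]
    rw [show (PySem.List.pyRange 1 m 1).map ffin ++ ffin m
          :: (PySem.List.pyRange (m + 1) (n + 1) 1).map presetG
        = ((PySem.List.pyRange 1 m 1).map ffin ++ [ffin m])
          ++ (PySem.List.pyRange (m + 1) (n + 1) 1).map presetG by simp]
    rw [hmap, kfun_succ_fill h1 h2 h3 h4 h5]
    rw [ffin_eq_fval h1 h2 h3 h4 h5, ← fill_val hk0, fill_count hk0]

-- A's whole loop from position m with the invariant state
lemma loopA_inv {n : Int} :
    ∀ (l : Nat) (m : Int), 2 ≤ m → m + l = n + 1 →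
    (PySem.List.pyRange m (n + 1) 1).foldl solveLoopA
      ((0 : Int) :: ((PySem.List.pyRange 1 m 1).map ffin
          ++ (PySem.List.pyRange m (n + 1) 1).map presetG),
       cfun (kfun m), kfun m % 2)
    = ((0 : Int) :: (PySem.List.pyRange 1 (n + 1) 1).map ffin,
       cfun (kfun (n + 1)), kfun (n + 1) % 2) := by
  intro l
  induction l with
  | zero =>
    intro m hm hl
    have hmn : m = n + 1 := by omega
    subst hmn
    rw [PySem.List.pyRange_one_eq_nil le_rfl]
    simp
  | succ l ih =>
    intro m hm hl
    rw [PySem.List.pyRange_one_cons (by omega : m < n + 1)]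
    simp only [List.foldl_cons, List.map_cons]
    rw [stepA_eq (n := n) hm]
    exact ih (m + 1) (by omega) (by omega)

-- A's initial array [0]*(n+1) as 0 :: a mapped range
lemma repl_eq {n : Int} (hn : 27 ≤ n) :
    PySem.List.pyRepeat [(0 : Int)] (n + 1)
    = (0 : Int) :: (PySem.List.pyRange 1 (n + 1) 1).map (fun _ => (0 : Int)) := by
  rw [PySem.List.pyRepeat_singleton]
  rw [show (n + 1).toNat = n.toNat + 1 by omega, List.replicate_succ]
  congr 1
  rw [List.map_const', PySem.List.length_pyRange_one,
    show (n + 1 - 1).toNat = n.toNat by omega]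

-- writing position i of A's initial array updates the mapped function pointwise
lemma set_cons_map (h : Int → Int) {n i : Int} (v : Int) (hi1 : 1 ≤ i) (_hi2 : i ≤ n) :
    PySem.List.pySetD ((0 : Int) :: (PySem.List.pyRange 1 (n + 1) 1).map h) i v
    = (0 : Int) :: (PySem.List.pyRange 1 (n + 1) 1).map (fun x => if x = i then v else h x) := by
  rw [PySem.List.pySetD_of_nonneg _ _ (by omega)]
  apply List.ext_getElem
  · simp
  · intro idx h_l h_r
    simp only [List.getElem_set]
    cases idx with
    | zero => rw [if_neg (by omega)]; rfl
    | succ j =>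
      have hj : j < (n + 1 - 1).toNat := by
        simpa [PySem.List.length_pyRange_one] using h_r
      simp only [List.getElem_cons_succ, List.getElem_map,
        PySem.List.getElem_pyRange_one]
      by_cases hc : i.toNat = j + 1
      · rw [if_pos hc, if_pos (by omega)]
      · rw [if_neg hc, if_neg (by omega)]

-- the five preset writes turn the zero array into presetG
lemma init_array {n : Int} (hn : 27 ≤ n) :
    PySem.List.pySetD (PySem.List.pySetD (PySem.List.pySetD (PySem.List.pySetD
      (PySem.List.pySetD (PySem.List.pyRepeat [(0 : Int)] (n + 1)) 1 1) 10 1) 26 1) 23 12) 27 12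
    = (0 : Int) :: (PySem.List.pyRange 1 (n + 1) 1).map presetG := by
  rw [repl_eq hn]
  rw [set_cons_map _ _ (by norm_num) (by omega)]
  rw [set_cons_map _ _ (by norm_num) (by omega)]
  rw [set_cons_map _ _ (by norm_num) (by omega)]
  rw [set_cons_map _ _ (by norm_num) (by omega)]
  rw [set_cons_map _ _ (by norm_num) (by omega)]
  apply congrArg
  apply List.map_congr_left
  intro x hx
  rw [PySem.List.mem_pyRange_one] at hx
  unfold presetG
  split_ifs <;> omega

-- A's odd branch computes map ffin over positions 1..n
lemma solveA_eq {n : Int} (hb : (PySem.Int.band n 1 == 1) = true) (hn : 27 ≤ n) :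
    solve n = (PySem.List.pyRange 1 (n + 1) 1).map ffin := by
  simp only [solve, if_pos hb, if_neg (by omega : ¬ n < 27)]
  rw [init_array hn]
  have hsplit : (PySem.List.pyRange 1 (n + 1) 1).map presetG
      = (PySem.List.pyRange 1 2 1).map ffin
        ++ (PySem.List.pyRange 2 (n + 1) 1).map presetG := by
    rw [PySem.List.pyRange_one_append 1 2 (n + 1) (by omega) (by omega), List.map_append]
    rw [show (PySem.List.pyRange 1 2 1).map presetG = [(1 : Int)] by decide,
      show (PySem.List.pyRange 1 2 1).map ffin = [(1 : Int)] by decide]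
  have hA := loopA_inv (n := n) (n + 1 - 2).toNat 2 le_rfl (by omega)
  rw [show cfun (kfun 2) = 2 by decide, show kfun 2 % 2 = 0 by decide] at hA
  rw [hsplit, hA]
  dsimp only
  rw [PySem.List.slice_toNat (a := 1) (b := n + 1) _ (by norm_num) (by omega)]
  rw [show ((1 : Int)).toNat = 1 by rfl, List.drop_one, List.tail_cons]
  apply List.take_of_length_le
  simp [PySem.List.length_pyRange_one]
  omega

-- the tail values: ffin on positions ≥ 28 is the closed form 3 + (m - 6)/2
lemma ffin_tail {m : Int} (hm : 28 ≤ m) : ffin m = 3 + (m - 6) / 2 := by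
  have hk : kfun m = m - 6 := by unfold kfun; split_ifs <;> omega
  rw [ffin_eq_fval (by omega) (by omega) (by omega) (by omega) (by omega), hk]
  unfold fval; split_ifs <;> omega

-- positions 28..28+2t carry the duplicated values 14..14+t
lemma tail_eq : ∀ (t : Nat),
    (PySem.List.pyRange 28 (28 + 2 * (t : Int)) 1).map ffin
    = dupRange 14 (14 + (t : Int)) := by
  intro t
  induction t with
  | zero => decide
  | succ t ih =>
    have h2 : (PySem.List.pyRange (28 + 2 * (t : Int)) (28 + 2 * ((t : Int) + 1)) 1).map ffin
        = [14 + (t : Int), 14 + (t : Int)] := by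
      rw [PySem.List.pyRange_one_cons (by omega), PySem.List.pyRange_one_cons (by omega),
        PySem.List.pyRange_one_eq_nil (by omega)]
      simp only [List.map_cons, List.map_nil]
      rw [ffin_tail (by omega), ffin_tail (by omega),
        show (3 : Int) + (28 + 2 * (t : Int) - 6) / 2 = 14 + (t : Int) by omega,
        show (3 : Int) + (28 + 2 * (t : Int) + 1 - 6) / 2 = 14 + (t : Int) by omega]
    push_cast
    rw [PySem.List.pyRange_one_append 28 (28 + 2 * (t : Int)) (28 + 2 * ((t : Int) + 1))
      (by omega) (by omega), List.map_append]
    push_cast at ih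
    rw [ih, h2]
    unfold dupRange
    rw [show (14 : Int) + ((t : Int) + 1) = 14 + (t : Int) + 1 by ring,
      PySem.List.pyRange_one_succ_right (a := 14) (b := 14 + (t : Int)) (by omega)]
    simp [List.flatMap_append]

-- even branch: mapping i//2+1 over 0..2t equals the duplicated range 1..t
lemma even_eq : ∀ (t : Nat),
    (PySem.List.pyRange 0 (2 * (t : Int)) 1).map (fun i => PySem.Int.floordiv i 2 + 1)
    = dupRange 1 (1 + (t : Int)) := by
  intro t
  induction t with
  | zero => decide
  | succ t ih =>
    have h2 : (PySem.List.pyRange (2 * (t : Int)) (2 * ((t : Int) + 1)) 1).map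
          (fun i => PySem.Int.floordiv i 2 + 1)
        = [(t : Int) + 1, (t : Int) + 1] := by
      rw [PySem.List.pyRange_one_cons (by omega), PySem.List.pyRange_one_cons (by omega),
        PySem.List.pyRange_one_eq_nil (by omega)]
      simp only [List.map_cons, List.map_nil]
      rw [PySem.Int.floordiv_eq_ediv_of_pos (by norm_num),
        PySem.Int.floordiv_eq_ediv_of_pos (by norm_num),
        show (2 * (t : Int)) / 2 + 1 = (t : Int) + 1 by omega,
        show (2 * (t : Int) + 1) / 2 + 1 = (t : Int) + 1 by omega]
    push_cast
    rw [PySem.List.pyRange_one_append 0 (2 * (t : Int)) (2 * ((t : Int) + 1))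
      (by omega) (by omega), List.map_append]
    push_cast at ih
    rw [ih, h2]
    unfold dupRange
    rw [show (1 : Int) + ((t : Int) + 1) = 1 + (t : Int) + 1 by ring,
      PySem.List.pyRange_one_succ_right (a := 1) (b := 1 + (t : Int)) (by omega)]
    simp [List.flatMap_append]
    omega

theorem solve_spec : Claim_equal_solve := by
  unfold Claim_equal_solve
  intro n _
  unfold Spec_solve
  by_cases hb : (PySem.Int.band n 1 == 1) = true
  · by_cases hlt : n < 27
    · simp [solve, solve_alt, hb, hlt]
    · have hn : 27 ≤ n := by omega
      have hodd : n % 2 = 1 := by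
        have := PySem.Int.band_one n
        rw [PySem.Int.mod_eq_emod_of_pos (by norm_num)] at this
        simp only [beq_iff_eq] at hb; omega
      rw [solveA_eq hb hn]
      simp only [solve_alt, if_pos hb, if_neg hlt]
      rw [PySem.Int.floordiv_eq_ediv_of_pos (by norm_num)]
      have hsplit : (PySem.List.pyRange 1 (n + 1) 1).map ffin
          = (PySem.List.pyRange 1 28 1).map ffin
            ++ (PySem.List.pyRange 28 (n + 1) 1).map ffin := by
        rw [PySem.List.pyRange_one_append 1 28 (n + 1) (by omega) (by omega), List.map_append]
      rw [hsplit, show (PySem.List.pyRange 1 28 1).map ffin = solvePrefix by decide]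
      have ht := tail_eq ((n - 27) / 2).toNat
      rw [show ((((n - 27) / 2).toNat : Int)) = (n - 27) / 2 by omega] at ht
      rw [show (28 : Int) + 2 * ((n - 27) / 2) = n + 1 by omega] at ht
      rw [ht]
  · have heven : n % 2 = 0 := by
      have := PySem.Int.band_one n
      rw [PySem.Int.mod_eq_emod_of_pos (by norm_num)] at this
      simp only [beq_iff_eq] at hb; omega
    simp only [solve, solve_alt, if_neg hb]
    by_cases hp : 0 ≤ n
    · rw [PySem.Int.floordiv_eq_ediv_of_pos (by norm_num)]
      have he := even_eq (n / 2).toNat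
      rw [show (((n / 2).toNat : Int)) = n / 2 by omega,
        show (2 : Int) * (n / 2) = n by omega,
        show (1 : Int) + n / 2 = n / 2 + 1 by omega] at he
      exact he
    · rw [PySem.List.pyRange_one_eq_nil (by omega)]
      unfold dupRange
      rw [PySem.List.pyRange_one_eq_nil (by
        rw [PySem.Int.floordiv_eq_ediv_of_pos (by norm_num)]; omega)]
      rfl
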